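-- pv_equiv track=rewrite | github.com/SpyrosLefkaditis/fibrohash | test.py | analyze_character_distribution
-- ===== SOURCE A (Python) =====
-- from typing import List, Dict, Tuple
--
-- def analyze_character_distribution(password: str) -> Dict[str, int]:
--     """
--     Analyze character type distribution in password.
--     """
--     analysis = {
--         'uppercase': 0,
--         'lowercase': 0,
--         'digits': 0,
--         'special': 0,
--         'unique_chars': 0
--     }
--
--     unique_chars = set()
--     for char in password:
--         unique_chars.add(char)
--         if char.isupper():
--             analysis['uppercase'] += 1
--         elif char.islower():
--             analysis['lowercase'] += 1
--         elif char.isdigit():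
--             analysis['digits'] += 1
--         else:
--             analysis['special'] += 1
--
--     analysis['unique_chars'] = len(unique_chars)
--     return analysis
-- ===== SOURCE B (Python) =====
-- def analyze_character_distribution(password: str) -> dict:
--     """Same counts via independent passes; 'special' by subtraction (categories are disjoint)."""
--     upper = sum(1 for c in password if c.isupper())
--     lower = sum(1 for c in password if c.islower())
--     digits = sum(1 for c in password if c.isdigit())
--     return {
--         'uppercase': upper,
--         'lowercase': lower,
--         'digits': digits,
--         'special': len(password) - upper - lower - digits,
--         'unique_chars': len(set(password)),
--     }
-- ===== Notes on version B (the rewrite author's own statement) =====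
-- stated objective: simpler
-- what changed: Replaces the single branching loop over a mutable dict-and-set state by four independent passes (one count comprehension per character category), with the special-character count obtained in closed form as the string length minus the three disjoint category counts and the unique-character count taken directly from a set of the whole string.
import Mathlib
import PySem

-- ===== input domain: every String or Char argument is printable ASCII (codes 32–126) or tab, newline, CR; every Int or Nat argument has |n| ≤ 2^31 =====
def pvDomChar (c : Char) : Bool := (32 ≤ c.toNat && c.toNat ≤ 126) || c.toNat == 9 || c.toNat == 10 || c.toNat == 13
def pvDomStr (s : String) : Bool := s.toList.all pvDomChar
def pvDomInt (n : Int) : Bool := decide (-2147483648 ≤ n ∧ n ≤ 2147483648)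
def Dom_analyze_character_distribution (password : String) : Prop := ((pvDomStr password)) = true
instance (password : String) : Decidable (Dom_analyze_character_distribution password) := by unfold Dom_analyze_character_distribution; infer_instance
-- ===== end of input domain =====

-- B replaces A's single branching loop by independent per-category passes with 'special'
-- obtained by subtraction; objective: simpler decomposition (same O(n) cost).

-- ===== PORT A =====
-- one loop iteration: add to the unique set, bump the matching dict counter
def pvAStep (st : PySem.Set Char × PySem.Dict String Int) (c : Char) :
    PySem.Set Char × PySem.Dict String Int :=
  let u := PySem.Set.add st.1 c
  let d :=
    if PySem.Chars.isupper c then PySem.Dict.modify st.2 "uppercase" 0 (· + 1)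
    else if PySem.Chars.islower c then PySem.Dict.modify st.2 "lowercase" 0 (· + 1)
    else if PySem.Chars.isdigit c then PySem.Dict.modify st.2 "digits" 0 (· + 1)
    else PySem.Dict.modify st.2 "special" 0 (· + 1)
  (u, d)

def analyze_character_distribution (password : String) : List (String × Int) :=
  let init : PySem.Dict String Int :=
    ⟨[("uppercase", 0), ("lowercase", 0), ("digits", 0), ("special", 0), ("unique_chars", 0)]⟩
  let st := password.toList.foldl pvAStep (PySem.Set.empty, init)
  (PySem.Dict.insert st.2 "unique_chars" (PySem.Set.len st.1)).items

-- ===== PORT B =====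
def analyze_character_distribution_alt (password : String) : List (String × Int) :=
  let cs := password.toList
  let upper : Int := (cs.countP (fun c => PySem.Chars.isupper c) : Nat)
  let lower : Int := (cs.countP (fun c => PySem.Chars.islower c) : Nat)
  let digits : Int := (cs.countP (fun c => PySem.Chars.isdigit c) : Nat)
  [("uppercase", upper), ("lowercase", lower), ("digits", digits),
   ("special", (cs.length : Int) - upper - lower - digits),
   ("unique_chars", PySem.Set.len (PySem.Set.ofList cs))]

-- ===== PRECONDITION & SPEC =====
def Spec_analyze_character_distribution (password : String) (out : List (String × Int)) : Prop := out = analyze_character_distribution_alt password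
instance (password : String) (out : List (String × Int)) : Decidable (Spec_analyze_character_distribution password out) := by unfold Spec_analyze_character_distribution; infer_instance

-- ===== CLAIM (what is proved, stated in full; the proofs are below) =====
def Claim_equal_analyze_character_distribution : Prop := ∀ (password : String), Dom_analyze_character_distribution password → Spec_analyze_character_distribution password (analyze_character_distribution password)

-- ===== LEMMAS AND PROOFS =====

-- the three ASCII character classes are pairwise disjoint (for every Char)
lemma pv_up_not_low {c : Char} (h : PySem.Chars.isupper c = true) :
    PySem.Chars.islower c = false := by
  simp [PySem.Chars.isupper, PySem.Chars.islower, Char.le_def,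
    UInt32.le_iff_toNat_le] at *
  omega

lemma pv_up_not_dig {c : Char} (h : PySem.Chars.isupper c = true) :
    PySem.Chars.isdigit c = false := by
  simp [PySem.Chars.isupper, PySem.Chars.isdigit, Char.le_def,
    UInt32.le_iff_toNat_le] at *
  omega

lemma pv_low_not_dig {c : Char} (h : PySem.Chars.islower c = true) :
    PySem.Chars.isdigit c = false := by
  simp [PySem.Chars.islower, PySem.Chars.isdigit, Char.le_def,
    UInt32.le_iff_toNat_le] at *
  omega

-- A's loop in closed form: the set accumulates, each counter gains its category count
lemma pv_loop (cs : List Char) (s0 : PySem.Set Char) (u l d sp z : Int) :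
    cs.foldl pvAStep (s0,
      ⟨[("uppercase", u), ("lowercase", l), ("digits", d), ("special", sp), ("unique_chars", z)]⟩)
    = (PySem.Set.update s0 cs,
       ⟨[("uppercase", u + (cs.countP (fun c => PySem.Chars.isupper c) : Nat)),
        ("lowercase", l + (cs.countP (fun c => PySem.Chars.islower c) : Nat)),
        ("digits", d + (cs.countP (fun c => PySem.Chars.isdigit c) : Nat)),
        ("special", sp + (cs.countP (fun c =>
            !PySem.Chars.isupper c && !PySem.Chars.islower c && !PySem.Chars.isdigit c) : Nat)),
        ("unique_chars", z)]⟩) := by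
  induction cs generalizing s0 u l d sp with
  | nil => simp [PySem.Set.update]
  | cons c cs ih =>
    rw [List.foldl_cons]
    by_cases hu : PySem.Chars.isupper c = true
    · have hl := pv_up_not_low hu
      have hd := pv_up_not_dig hu
      show List.foldl pvAStep (pvAStep _ c) cs = _
      simp only [pvAStep, hu, if_true]
      show List.foldl pvAStep (PySem.Set.add s0 c,
        (⟨[("uppercase", u + 1), ("lowercase", l), ("digits", d), ("special", sp),
           ("unique_chars", z)]⟩ : PySem.Dict String Int)) cs = _
      rw [ih]
      simp [PySem.Set.update, hu, hl, hd]
      ring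
    · by_cases hl : PySem.Chars.islower c = true
      · have hd := pv_low_not_dig hl
        show List.foldl pvAStep (pvAStep _ c) cs = _
        simp only [pvAStep, hu, hl, if_true, if_false, Bool.false_eq_true]
        show List.foldl pvAStep (PySem.Set.add s0 c,
          (⟨[("uppercase", u), ("lowercase", l + 1), ("digits", d), ("special", sp),
             ("unique_chars", z)]⟩ : PySem.Dict String Int)) cs = _
        rw [ih]
        simp [PySem.Set.update, hu, hl, hd]
        ring
      · by_cases hd : PySem.Chars.isdigit c = true
        · show List.foldl pvAStep (pvAStep _ c) cs = _
          simp only [pvAStep, hu, hl, hd, if_true, if_false, Bool.false_eq_true]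
          show List.foldl pvAStep (PySem.Set.add s0 c,
            (⟨[("uppercase", u), ("lowercase", l), ("digits", d + 1), ("special", sp),
               ("unique_chars", z)]⟩ : PySem.Dict String Int)) cs = _
          rw [ih]
          simp [PySem.Set.update, hu, hl, hd]
          ring
        · show List.foldl pvAStep (pvAStep _ c) cs = _
          simp only [pvAStep, hu, hl, hd, if_false, Bool.false_eq_true]
          show List.foldl pvAStep (PySem.Set.add s0 c,
            (⟨[("uppercase", u), ("lowercase", l), ("digits", d), ("special", sp + 1),
               ("unique_chars", z)]⟩ : PySem.Dict String Int)) cs = _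
          rw [ih]
          simp [PySem.Set.update, hu, hl, hd]
          ring

-- the four disjoint categories partition the string
lemma pv_partition (cs : List Char) :
    cs.countP (fun c => PySem.Chars.isupper c)
      + cs.countP (fun c => PySem.Chars.islower c)
      + cs.countP (fun c => PySem.Chars.isdigit c)
      + cs.countP (fun c =>
          !PySem.Chars.isupper c && !PySem.Chars.islower c && !PySem.Chars.isdigit c)
    = cs.length := by
  induction cs with
  | nil => simp
  | cons c cs ih =>
    simp only [List.countP_cons, List.length_cons]
    by_cases hu : PySem.Chars.isupper c = true
    · have hl := pv_up_not_low hu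
      have hd := pv_up_not_dig hu
      simp [hu, hl, hd]; omega
    · by_cases hl : PySem.Chars.islower c = true
      · have hd := pv_low_not_dig hl
        simp [hu, hl, hd]; omega
      · by_cases hd : PySem.Chars.isdigit c = true
        · simp [hu, hl, hd]; omega
        · simp [hu, hl, hd]; omega

-- ===== VERDICT (by name: the statement is the Claim_ definition above) =====
theorem analyze_character_distribution_spec : Claim_equal_analyze_character_distribution := by
  intro password _
  unfold Spec_analyze_character_distribution analyze_character_distribution
    analyze_character_distribution_alt
  have hloop := pv_loop password.toList PySem.Set.empty 0 0 0 0 0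
  dsimp only
  rw [hloop]
  have hpart := pv_partition password.toList
  simp [PySem.Dict.insert, PySem.Set.update_nil_left]
  have hlen : password.toList.length = password.length := by
    simp
  omega
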